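-- pv_equiv track=rewrite | github.com/ryus0006/FIT5230_DefensiveToken | demo.py | recursive_filter
-- ===== SOURCE A (Python) =====
-- def recursive_filter(s, filters):
--     orig = s
--     for f in filters:
--         s = s.replace(f, '')
--     if s != orig:
--         return recursive_filter(s, filters)
--     else:
--         return s
-- ===== SOURCE B (Python) =====
-- def recursive_filter(s, filters):
--     # Same fixpoint computed by a bounded loop instead of recursion: each
--     # changing pass removes at least one character, so len(s)+1 passes suffice.
--     for _ in range(len(s) + 1):
--         t = s
--         for f in filters:
--             t = t.replace(f, '')
--         if t == s:
--             return s
--         s = t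
--     return s
-- ===== Notes on version B (the rewrite author's own statement) =====
-- stated objective: alternative
-- what changed: Replaces A's unbounded tail recursion by a bounded for-loop (len(s)+1 passes, each changing pass removes at least one character), so the fixpoint is reached iteratively with no RecursionError risk.
import Mathlib
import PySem

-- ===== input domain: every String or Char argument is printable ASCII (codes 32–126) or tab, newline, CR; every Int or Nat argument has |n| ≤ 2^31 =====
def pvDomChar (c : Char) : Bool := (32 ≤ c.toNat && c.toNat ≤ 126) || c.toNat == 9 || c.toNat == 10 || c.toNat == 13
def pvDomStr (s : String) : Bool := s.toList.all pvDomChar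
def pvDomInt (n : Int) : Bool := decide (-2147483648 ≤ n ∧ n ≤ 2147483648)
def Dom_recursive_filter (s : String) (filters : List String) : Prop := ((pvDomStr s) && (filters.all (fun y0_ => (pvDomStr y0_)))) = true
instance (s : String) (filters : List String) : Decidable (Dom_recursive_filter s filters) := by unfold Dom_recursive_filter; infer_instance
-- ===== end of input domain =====

-- ===== PORT A =====
-- B changes only the control decomposition: A's unbounded tail recursion becomes a bounded
-- iteration in B (objective: alternative; same per-pass work, no speed claim).

-- Helper lemmas cited by port A's decreasing_by (termination of A's recursion).
theorem pvGoLen (old : List Char) (fuel : Nat) (l acc : List Char) :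
    (PySem.Chars.replace.go old [] fuel l acc).length ≤ acc.length + l.length := by
  induction fuel generalizing l acc with
  | zero => simp [PySem.Chars.replace.go]
  | succ n ih =>
    cases l with
    | nil => simp [PySem.Chars.replace.go]
    | cons c t =>
      rw [PySem.Chars.replace.go]
      split
      · simp only [List.reverse_nil, List.nil_append]
        have h1 : old.length ≤ (c :: t).length := by
          have := List.isPrefixOf_iff_prefix.mp (by assumption)
          exact this.length_le
        have := ih ((c :: t).drop old.length) acc
        simp only [List.length_drop, List.length_cons] at this h1 ⊢
        omega
      · have := ih t (c :: acc)
        simp only [List.length_cons] at this ⊢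
        omega

theorem pvGoEqOrLt (old : List Char) (hold : old ≠ []) (fuel : Nat) (l acc : List Char) :
    PySem.Chars.replace.go old [] fuel l acc = acc.reverse ++ l ∨
      (PySem.Chars.replace.go old [] fuel l acc).length < acc.length + l.length := by
  induction fuel generalizing l acc with
  | zero => left; simp [PySem.Chars.replace.go]
  | succ n ih =>
    cases l with
    | nil => left; simp [PySem.Chars.replace.go]
    | cons c t =>
      rw [PySem.Chars.replace.go]
      split
      · right
        simp only [List.reverse_nil, List.nil_append]
        have hpre : old.length ≤ (c :: t).length := by
          have := List.isPrefixOf_iff_prefix.mp (by assumption)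
          exact this.length_le
        have hone : 1 ≤ old.length := by
          cases old with
          | nil => exact absurd rfl hold
          | cons _ _ => simp
        have := pvGoLen old n ((c :: t).drop old.length) acc
        simp only [List.length_drop, List.length_cons] at this hpre ⊢
        omega
      · rcases ih t (c :: acc) with h | h
        · left; rw [h]; simp
        · right; simp only [List.length_cons] at h ⊢; omega

theorem pvReplaceEqOrLt (l old : List Char) :
    PySem.Chars.replace l old [] = l ∨ (PySem.Chars.replace l old []).length < l.length := by
  by_cases h : old = []
  · left
    subst h
    have hid : ∀ l : List Char, (List.map (fun c => [c]) l).flatten = l := by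
      intro l; induction l <;> simp_all
    simp [PySem.Chars.replace, List.flatMap, hid]
  · rw [PySem.Chars.replace]
    simp only [List.isEmpty_iff, h, ite_false]
    have := pvGoEqOrLt old h l.length l []
    simpa using this

theorem pvReplaceLe (l old : List Char) :
    (PySem.Chars.replace l old []).length ≤ l.length := by
  rcases pvReplaceEqOrLt l old with h | h
  · rw [h]
  · omega

theorem pvPassToList (filters : List String) (s : String) :
    (filters.foldl (fun a f => PySem.Str.replace a f "") s).toList =
      filters.foldl (fun a f => PySem.Chars.replace a f.toList []) s.toList := by
  induction filters generalizing s with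
  | nil => rfl
  | cons f fs ih =>
    simp only [List.foldl_cons]
    rw [ih]
    congr 1
    simp [PySem.Str.replace]

theorem pvPassLLe (fs : List (List Char)) (l : List Char) :
    (fs.foldl (fun a f => PySem.Chars.replace a f []) l).length ≤ l.length := by
  induction fs generalizing l with
  | nil => simp
  | cons f fs ih =>
    simp only [List.foldl_cons]
    exact (ih _).trans (pvReplaceLe l f)

theorem pvPassLEqOrLt (fs : List (List Char)) (l : List Char) :
    fs.foldl (fun a f => PySem.Chars.replace a f []) l = l ∨
      (fs.foldl (fun a f => PySem.Chars.replace a f []) l).length < l.length := by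
  induction fs generalizing l with
  | nil => left; rfl
  | cons f fs ih =>
    simp only [List.foldl_cons]
    rcases pvReplaceEqOrLt l f with h | h
    · rw [h]; exact ih l
    · right
      exact lt_of_le_of_lt (pvPassLLe fs _) h

-- A changes s implies A's pass strictly shrinks the string (for termination).
theorem pvPassDecr (filters : List String) (s : String)
    (h : filters.foldl (fun a f => PySem.Str.replace a f "") s ≠ s) :
    (filters.foldl (fun a f => PySem.Str.replace a f "") s).toList.length < s.toList.length := by
  rw [pvPassToList]
  have hfold :
      (filters.map String.toList).foldl (fun a f => PySem.Chars.replace a f []) s.toList =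
        filters.foldl (fun a f => PySem.Chars.replace a f.toList []) s.toList := by
    rw [List.foldl_map]
  rcases pvPassLEqOrLt (filters.map String.toList) s.toList with he | hl
  · exfalso
    apply h
    apply String.toList_inj.mp
    rw [pvPassToList]
    rw [hfold] at he
    exact he
  · rw [hfold] at hl
    exact hl

-- Literal port of A: one pass of replaces, then recurse if the string changed.
def recursive_filter (s : String) (filters : List String) : String :=
  let t := filters.foldl (fun a f => PySem.Str.replace a f "") s
  if t ≠ s then recursive_filter t filters else t
termination_by s.toList.length
decreasing_by
  rename_i h
  have key : List.foldl (fun (a : String) (x : {x // x ∈ filters}) => PySem.Str.replace a x.1 "") s filters.attach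
      = List.foldl (fun a f => PySem.Str.replace a f "") s filters := by
    conv_rhs => rw [← List.attach_map_subtype_val filters]
    rw [List.foldl_map]
  have h' : List.foldl (fun (a : String) (x : {x // x ∈ filters}) => PySem.Str.replace a x.1 "") s filters.attach ≠ s := h
  rw [key] at h'
  simpa [key] using pvPassDecr filters s h' 

-- ===== PORT B =====
-- B's bounded loop: `for _ in range(len(s)+1): ...` counted down as fuel.
def rfLoopB (filters : List String) : Nat → String → String
  | 0, s => s
  | Nat.succ n, s =>
    let t := filters.foldl (fun a f => PySem.Str.replace a f "") s
    if t = s then s else rfLoopB filters n t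

def recursive_filter_alt (s : String) (filters : List String) : String :=
  rfLoopB filters (s.toList.length + 1) s

-- ===== PRECONDITION & SPEC =====
def Spec_recursive_filter (s : String) (filters : List String) (out : String) : Prop := out = recursive_filter_alt s filters
instance (s : String) (filters : List String) (out : String) : Decidable (Spec_recursive_filter s filters out) := by unfold Spec_recursive_filter; infer_instance

-- ===== CLAIM (what is proved, stated in full; the proofs are below) =====
def Claim_equal_recursive_filter : Prop := ∀ (s : String) (filters : List String), Dom_recursive_filter s filters → Spec_recursive_filter s filters (recursive_filter s filters)

-- ===== LEMMAS AND PROOFS =====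

-- With enough fuel (more than len s), B's loop computes A's recursion.
theorem pvLoopEq (filters : List String) (n : Nat) (s : String)
    (h : s.toList.length < n) : rfLoopB filters n s = recursive_filter s filters := by
  induction n generalizing s with
  | zero => omega
  | succ m ih =>
    rw [rfLoopB]
    conv_rhs => rw [recursive_filter]
    by_cases he : filters.foldl (fun a f => PySem.Str.replace a f "") s = s
    · simp [he]
    · simp only [he, if_neg, ne_eq, not_false_iff, if_pos]
      have hd := pvPassDecr filters s he
      exact ih _ (by omega)

-- ===== VERDICT (by name: the statement is the Claim_ definition above) =====
theorem recursive_filter_spec : Claim_equal_recursive_filter := by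
  intro s filters _
  unfold Spec_recursive_filter recursive_filter_alt
  exact (pvLoopEq filters (s.toList.length + 1) s (by omega)).symm
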